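-- pv_equiv track=rewrite | github.com/metraton/gaia-ops | hooks/modules/tools/cloud_pipe_validator.py | _strip_quoted_sections
-- ===== SOURCE A (Python) =====
-- def _strip_quoted_sections(text: str) -> str:
--     """
--     Replace content inside single and double quotes with spaces.
--     Handles simple quoting (no nested quotes, no escape sequences needed
--     for the operators we scan for).
--     """
--     result = []
--     in_single = False
--     in_double = False
--
--     for ch in text:
--         if ch == "'" and not in_double:
--             in_single = not in_single
--             result.append(ch)
--         elif ch == '"' and not in_single:
--             in_double = not in_double
--             result.append(ch)
--         elif in_single or in_double:
--             result.append(' ')  # mask the character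
--         else:
--             result.append(ch)
--
--     return ''.join(result)
-- ===== SOURCE B (Python) =====
-- def _strip_quoted_sections(text: str) -> str:
--     """Mask quoted content with spaces via cursor jumps between quote
--     boundaries (str.find) instead of per-character state flags."""
--     out = []
--     i = 0
--     n = len(text)
--     while i < n:
--         ch = text[i]
--         if ch != "'" and ch != '"':
--             out.append(ch)
--             i += 1
--         else:
--             out.append(ch)
--             j = text.find(ch, i + 1)
--             if j == -1:
--                 out.append(' ' * (n - i - 1))
--                 i = n
--             else:
--                 out.append(' ' * (j - i - 1))
--                 out.append(ch)
--                 i = j + 1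
--     return ''.join(out)
-- ===== Notes on version B (the rewrite author's own statement) =====
-- stated objective: alternative
-- what changed: Replaced the per-character FSM with in_single/in_double flags by a cursor loop that, on seeing a quote, jumps straight to its matching quote with str.find and emits the masked run in one step.
import Mathlib
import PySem

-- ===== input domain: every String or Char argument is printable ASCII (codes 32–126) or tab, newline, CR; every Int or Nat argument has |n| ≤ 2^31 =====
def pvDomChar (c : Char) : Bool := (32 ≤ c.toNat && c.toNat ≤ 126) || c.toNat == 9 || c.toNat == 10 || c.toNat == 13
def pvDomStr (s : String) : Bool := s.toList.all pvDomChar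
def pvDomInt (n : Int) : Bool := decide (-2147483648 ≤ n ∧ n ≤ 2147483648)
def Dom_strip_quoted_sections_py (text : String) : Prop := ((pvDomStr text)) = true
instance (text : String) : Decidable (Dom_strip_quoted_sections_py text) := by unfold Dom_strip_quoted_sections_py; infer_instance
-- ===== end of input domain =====

-- B replaces A's per-character quote-state machine by a cursor that jumps to each quote's match; equivalence of the two traversals is proved below.

-- ===== PORT A =====
-- one step of A's for-loop: state = (result, in_single, in_double)
def pvAStep (st : List Char × Bool × Bool) (ch : Char) : List Char × Bool × Bool :=
  let (result, in_single, in_double) := st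
  if ch = '\'' && !in_double then (result ++ [ch], !in_single, in_double)
  else if ch = '"' && !in_single then (result ++ [ch], in_single, !in_double)
  else if in_single || in_double then (result ++ [' '], in_single, in_double)
  else (result ++ [ch], in_single, in_double)

def strip_quoted_sections_py (text : String) : String :=
  String.ofList (text.toList.foldl pvAStep ([], false, false)).1

-- ===== PORT B =====
-- B's while-loop: on a quote, find its match in the remainder (takeWhile/dropWhile
-- at the cursor = text.find(ch, i+1)), emit the masked run in one step, jump past it.
def pvBGo : List Char → List Char
  | [] => []
  | ch :: rest =>
    if ch = '\'' || ch = '"' then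
      match _h : rest.dropWhile (· ≠ ch) with
      | [] => ch :: (rest.takeWhile (· ≠ ch)).map (fun _ => ' ')
      | _ :: tail => ch :: ((rest.takeWhile (· ≠ ch)).map (fun _ => ' ') ++ ch :: pvBGo tail)
    else ch :: pvBGo rest
termination_by l => l.length
decreasing_by
  · have hle := List.length_dropWhile_le (p := (· ≠ ch)) (l := rest)
    rw [_h] at hle; simp at hle ⊢; omega
  · simp

def strip_quoted_sections_py_alt (text : String) : String :=
  String.ofList (pvBGo text.toList)

-- ===== PRECONDITION & SPEC =====
def Spec_strip_quoted_sections_py (text : String) (out : String) : Prop := out = strip_quoted_sections_py_alt text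
instance (text : String) (out : String) : Decidable (Spec_strip_quoted_sections_py text out) := by unfold Spec_strip_quoted_sections_py; infer_instance

-- ===== CLAIM (what is proved, stated in full; the proofs are below) =====
def Claim_equal_strip_quoted_sections_py : Prop := ∀ (text : String), Dom_strip_quoted_sections_py text → Spec_strip_quoted_sections_py text (strip_quoted_sections_py text)

-- ===== LEMMAS AND PROOFS =====

-- A's loop, written as structural recursion on the remaining input (proof device)
def pvAGo : List Char → Bool → Bool → List Char
  | [], _, _ => []
  | ch :: rest, s, d =>
    if ch = '\'' && !d then ch :: pvAGo rest (!s) d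
    else if ch = '"' && !s then ch :: pvAGo rest s (!d)
    else if s || d then ' ' :: pvAGo rest s d
    else ch :: pvAGo rest s d

lemma pvAStep_foldl (l : List Char) (acc : List Char) (s d : Bool) :
    (l.foldl pvAStep (acc, s, d)).1 = acc ++ pvAGo l s d := by
  induction l generalizing acc s d with
  | nil => simp [pvAGo]
  | cons ch rest ih =>
    simp only [List.foldl_cons, pvAStep, pvAGo]
    split_ifs <;> simp [ih]

-- inside a single-quoted section, A masks everything up to the next '
lemma pvAGo_single (l : List Char) :
    pvAGo l true false =
      (l.takeWhile (· ≠ '\'')).map (fun _ => ' ') ++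
      (match l.dropWhile (· ≠ '\'') with
       | [] => []
       | _ :: t => '\'' :: pvAGo t false false) := by
  induction l with
  | nil => simp [pvAGo]
  | cons c rest ih =>
    by_cases hc : c = '\''
    · subst hc; simp [pvAGo, List.takeWhile, List.dropWhile]
    · simp only [pvAGo, List.takeWhile_cons, List.dropWhile_cons]
      have : ¬(c = '"' && !true) = true := by simp
      simp [hc, ih]

-- inside a double-quoted section, A masks everything up to the next "
lemma pvAGo_double (l : List Char) :
    pvAGo l false true =
      (l.takeWhile (· ≠ '"')).map (fun _ => ' ') ++
      (match l.dropWhile (· ≠ '"') with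
       | [] => []
       | _ :: t => '"' :: pvAGo t false false) := by
  induction l with
  | nil => simp [pvAGo]
  | cons c rest ih =>
    by_cases hc : c = '"'
    · subst hc; simp [pvAGo, List.takeWhile, List.dropWhile]
    · simp only [pvAGo, List.takeWhile_cons, List.dropWhile_cons]
      simp [hc, ih]

theorem pvAGo_eq_pvBGo : ∀ l : List Char, pvAGo l false false = pvBGo l
  | [] => by simp [pvAGo, pvBGo]
  | ch :: rest => by
    by_cases h1 : ch = '\''
    · subst h1
      rw [show pvAGo ('\'' :: rest) false false = '\'' :: pvAGo rest true false from by
            simp [pvAGo]]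
      rw [pvAGo_single]
      unfold pvBGo
      rcases hdw : rest.dropWhile (· ≠ '\'') with _ | ⟨x, tail⟩
      · simp
      · have : pvAGo tail false false = pvBGo tail := pvAGo_eq_pvBGo tail
        simp [this]
    · by_cases h2 : ch = '"'
      · subst h2
        rw [show pvAGo ('"' :: rest) false false = '"' :: pvAGo rest false true from by
              simp [pvAGo]]
        rw [pvAGo_double]
        unfold pvBGo
        rcases hdw : rest.dropWhile (· ≠ '"') with _ | ⟨x, tail⟩
        · simp
        · have : pvAGo tail false false = pvBGo tail := pvAGo_eq_pvBGo tail
          simp [this]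
      · have : pvAGo (ch :: rest) false false = ch :: pvAGo rest false false := by
          simp [pvAGo, h1, h2]
        rw [this]
        unfold pvBGo
        simp [h1, h2, pvAGo_eq_pvBGo rest]
termination_by l => l.length
decreasing_by
  · have hle := List.length_dropWhile_le (p := (· ≠ '\'')) (l := rest)
    rw [hdw] at hle; simp at hle ⊢; omega
  · have hle := List.length_dropWhile_le (p := (· ≠ '"')) (l := rest)
    rw [hdw] at hle; simp at hle ⊢; omega
  · simp

-- ===== VERDICT (by name: the statement is the Claim_ definition above) =====
theorem strip_quoted_sections_py_spec : Claim_equal_strip_quoted_sections_py := by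
  intro text _
  unfold Spec_strip_quoted_sections_py strip_quoted_sections_py strip_quoted_sections_py_alt
  rw [pvAStep_foldl, pvAGo_eq_pvBGo]
  simp
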